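-- pv_equiv track=rewrite | github.com/Icexbb/SekaiSubtitle-Python | src/script/process.py | dialog_body_typer
-- ===== SOURCE A (Python) =====
-- def dialog_body_typer(body: str, char_interval: list[int, int] = [80, 50]):
--     return_char = ["\n", "\\n", "\\N"]
--     for c in return_char:
--         body.replace(c, "\n")
--     body_list = list(body)
--     res = []
--     next_start = char_interval[1]
--     for index, char in enumerate(body_list):
--         if char_interval:
--             start = next_start + (300 if char == '\n' else 0)
--             end = start + char_interval[1]
--             r = rf"{{\alphaFF\t({start},{end},1,\alpha0)}}" + (char if char != "\n" else r"\N")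
--             res.append(r)
--             next_start = start + char_interval[0]
--         else:
--             res.append(char if char != "\n" else r"\N")
--
--     return "".join(res)
-- ===== SOURCE B (Python) =====
-- def dialog_body_typer(body: str, char_interval: list[int, int] = [80, 50]):
--     step = char_interval[0]
--     fade = char_interval[1]
--     # inclusive prefix counts of newlines
--     prefix = []
--     n = 0
--     for c in body:
--         if c == "\n":
--             n += 1
--         prefix.append(n)
--     parts = []
--     for i, (c, k) in enumerate(zip(body, prefix)):
--         s = fade + i * step + 300 * k
--         parts.append(
--             rf"{{\alphaFF\t({s},{s + fade},1,\alpha0)}}"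
--             + ("\\N" if c == "\n" else c)
--         )
--     return "".join(parts)
-- ===== Notes on version B (the rewrite author's own statement) =====
-- stated objective: alternative
-- what changed: Replaces the next_start accumulator loop with a closed-form per-character start time (start_i = fade + i*step + 300*inclusive newline prefix count), computed in two passes: prefix newline counts, then a direct enumerate/map; drops the dead body.replace calls and the unreachable else branch.
import Mathlib
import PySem

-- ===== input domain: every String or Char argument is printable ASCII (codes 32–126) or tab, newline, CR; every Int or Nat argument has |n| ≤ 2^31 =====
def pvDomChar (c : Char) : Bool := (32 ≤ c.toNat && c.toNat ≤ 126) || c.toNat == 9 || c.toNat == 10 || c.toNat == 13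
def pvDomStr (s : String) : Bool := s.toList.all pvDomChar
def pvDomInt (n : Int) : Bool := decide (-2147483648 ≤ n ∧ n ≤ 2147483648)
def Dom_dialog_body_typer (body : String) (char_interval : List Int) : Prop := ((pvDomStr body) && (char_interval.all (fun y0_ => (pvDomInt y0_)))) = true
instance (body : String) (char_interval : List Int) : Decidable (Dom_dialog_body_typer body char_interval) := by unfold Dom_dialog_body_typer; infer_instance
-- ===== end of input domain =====

-- B replaces A's threaded next_start accumulator by a closed-form start time computed
-- from inclusive prefix newline counts (alternative decomposition; same cost).

-- ===== PORT A =====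
-- the dead body.replace calls of the Python do nothing (str.replace returns a new string, discarded)
def dialog_body_typer (body : String) (char_interval : List Int) : String :=
  let body_list := body.toList
  let fin := body_list.foldl (fun (acc : List String × Int) char =>
    if char_interval ≠ [] then
      let start := acc.2 + (if char = '\n' then 300 else 0)
      let e := start + (PySem.List.pyGet? char_interval 1).getD 0
      let r := "{\\alphaFF\\t(" ++ PySem.Int.toStr start ++ "," ++ PySem.Int.toStr e
        ++ ",1,\\alpha0)}" ++ (if char ≠ '\n' then String.ofList [char] else "\\N")
      (acc.1 ++ [r], start + (PySem.List.pyGet? char_interval 0).getD 0)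
    else
      (acc.1 ++ [if char ≠ '\n' then String.ofList [char] else "\\N"], acc.2))
    ([], (PySem.List.pyGet? char_interval 1).getD 0)
  PySem.Str.join "" fin.1

-- ===== PORT B =====
def dialog_body_typer_alt (body : String) (char_interval : List Int) : String :=
  let step := (PySem.List.pyGet? char_interval 0).getD 0
  let fade := (PySem.List.pyGet? char_interval 1).getD 0
  let pref := (body.toList.foldl (fun (acc : List Int × Int) c =>
      let n := if c = '\n' then acc.2 + 1 else acc.2
      (acc.1 ++ [n], n)) ([], 0)).1
  PySem.Str.join "" ((PySem.List.enumerate (body.toList.zip pref)).map (fun p =>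
    let s := fade + p.1 * step + 300 * p.2.2
    "{\\alphaFF\\t(" ++ PySem.Int.toStr s ++ "," ++ PySem.Int.toStr (s + fade)
      ++ ",1,\\alpha0)}" ++ (if p.2.1 = '\n' then "\\N" else String.ofList [p.2.1])))

-- ===== PRECONDITION & SPEC =====
-- Python A evaluates char_interval[1] (and char_interval[0]) and raises IndexError when
-- char_interval has fewer than two elements, so exactly those inputs are excluded.
def Pre_dialog_body_typer (body : String) (char_interval : List Int) : Prop :=
  2 ≤ char_interval.length
instance (body : String) (char_interval : List Int) : Decidable (Pre_dialog_body_typer body char_interval) := by unfold Pre_dialog_body_typer; infer_instance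
def pvWitness_dialog_body_typer : String × List Int := ("ab\nc", [80, 50])

def Spec_dialog_body_typer (body : String) (char_interval : List Int) (out : String) : Prop := out = dialog_body_typer_alt body char_interval
instance (body : String) (char_interval : List Int) (out : String) : Decidable (Spec_dialog_body_typer body char_interval out) := by unfold Spec_dialog_body_typer; infer_instance

-- ===== CLAIM (what is proved, stated in full; the proofs are below) =====
def Claim_equal_dialog_body_typer : Prop := ∀ (body : String) (char_interval : List Int), Dom_dialog_body_typer body char_interval → Pre_dialog_body_typer body char_interval → Spec_dialog_body_typer body char_interval (dialog_body_typer body char_interval)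

-- ===== LEMMAS AND PROOFS =====

/-- Common specification of the per-character tag list, with threaded next-start. -/
def pvTags (step fade : Int) : List Char → Int → List String
  | [], _ => []
  | c :: rest, next =>
    ("{\\alphaFF\\t(" ++ PySem.Int.toStr (next + if c = '\n' then 300 else 0) ++ ","
      ++ PySem.Int.toStr ((next + if c = '\n' then 300 else 0) + fade)
      ++ ",1,\\alpha0)}" ++ (if c = '\n' then "\\N" else String.ofList [c]))
    :: pvTags step fade rest ((next + if c = '\n' then 300 else 0) + step)

/-- Inclusive prefix newline counts starting from count `n`. -/
def pvPrefix : List Char → Int → List Int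
  | [], _ => []
  | c :: rest, n =>
    (if c = '\n' then n + 1 else n) :: pvPrefix rest (if c = '\n' then n + 1 else n)

theorem pvA_loop (step fade : Int) :
    ∀ (l : List Char) (p : List String × Int),
    (l.foldl (fun (acc : List String × Int) char =>
      (acc.1 ++ ["{\\alphaFF\\t(" ++ PySem.Int.toStr (acc.2 + if char = '\n' then 300 else 0)
        ++ "," ++ PySem.Int.toStr ((acc.2 + if char = '\n' then 300 else 0) + fade)
        ++ ",1,\\alpha0)}" ++ (if char ≠ '\n' then String.ofList [char] else "\\N")],
       (acc.2 + if char = '\n' then 300 else 0) + step)) p).1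
    = p.1 ++ pvTags step fade l p.2 := by
  intro l
  induction l with
  | nil => intro p; simp [pvTags]
  | cons c rest ih =>
    intro p
    rw [List.foldl_cons, ih]
    by_cases hc : c = '\n' <;> simp [pvTags, hc]

theorem pvB_prefix :
    ∀ (l : List Char) (q : List Int × Int),
    (l.foldl (fun (acc : List Int × Int) c =>
      (acc.1 ++ [if c = '\n' then acc.2 + 1 else acc.2],
       if c = '\n' then acc.2 + 1 else acc.2)) q).1 = q.1 ++ pvPrefix l q.2 := by
  intro l
  induction l with
  | nil => intro q; simp [pvPrefix]
  | cons c rest ih =>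
    intro q
    rw [List.foldl_cons, ih]
    by_cases hc : c = '\n' <;> simp [pvPrefix, hc]

theorem pvB_map (step fade : Int) :
    ∀ (l : List Char) (i k : Int),
    ((PySem.List.enumerate (l.zip (pvPrefix l k)) i).map (fun p =>
      "{\\alphaFF\\t(" ++ PySem.Int.toStr (fade + p.1 * step + 300 * p.2.2) ++ ","
        ++ PySem.Int.toStr ((fade + p.1 * step + 300 * p.2.2) + fade)
        ++ ",1,\\alpha0)}" ++ (if p.2.1 = '\n' then "\\N" else String.ofList [p.2.1])))
    = pvTags step fade l (fade + i * step + 300 * k) := by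
  intro l
  induction l with
  | nil => intro i k; simp [pvPrefix, pvTags]
  | cons c rest ih =>
    intro i k
    by_cases hc : c = '\n'
    · simp only [pvPrefix, pvTags, hc, List.zip_cons_cons, PySem.List.enumerate_cons,
        List.map_cons, ite_true]
      have ih' := ih (i + 1) (k + 1)
      rw [show fade + (i + 1) * step + 300 * (k + 1)
            = fade + i * step + 300 * k + 300 + step from by ring] at ih'
      rw [ih']
      rw [show fade + i * step + 300 * (k + 1)
            = fade + i * step + 300 * k + 300 from by ring]
    · simp only [pvPrefix, pvTags, hc, List.zip_cons_cons, PySem.List.enumerate_cons,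
        List.map_cons, ite_false]
      have ih' := ih (i + 1) k
      rw [show fade + (i + 1) * step + 300 * k
            = fade + i * step + 300 * k + 0 + step from by ring] at ih'
      rw [ih']
      rw [show fade + i * step + 300 * k + 0 = fade + i * step + 300 * k from by ring]

-- ===== VERDICT (by name: the statement is the Claim_ definition above) =====
theorem dialog_body_typer_spec : Claim_equal_dialog_body_typer := by
  intro body ci _ hpre
  have hne : ci ≠ [] := by
    intro h; rw [h] at hpre; simp [Pre_dialog_body_typer] at hpre
  simp only [Spec_dialog_body_typer, dialog_body_typer, dialog_body_typer_alt, if_pos hne]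
  rw [pvA_loop, pvB_prefix]
  simp only [List.nil_append]
  rw [pvB_map]
  norm_num
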